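-- pv_equiv track=rewrite | github.com/Marquita-oss/deep-prostate | infrastructure/utils/startup_validator.py | _version_compatible
-- ===== SOURCE A (Python) =====
-- def _version_compatible(installed: str, required: str) -> bool:
--     """
--     Verifica si una versión instalada es compatible con la requerida.
--
--     Args:
--         installed: Versión instalada
--         required: Versión mínima requerida
--
--     Returns:
--         True si es compatible
--     """
--     try:
--         if installed == 'unknown':
--             return True  # Asumir compatible si no se puede determinar
--
--         # Parsear versiones
--         installed_parts = [int(x) for x in installed.split('.') if x.isdigit()]
--         required_parts = [int(x) for x in required.split('.') if x.isdigit()]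
--
--         # Normalizar longitudes
--         max_len = max(len(installed_parts), len(required_parts))
--         installed_parts.extend([0] * (max_len - len(installed_parts)))
--         required_parts.extend([0] * (max_len - len(required_parts)))
--
--         return installed_parts >= required_parts
--
--     except Exception:
--         return True  # En caso de error, asumir compatible
-- ===== SOURCE B (Python) =====
-- def _version_compatible(installed: str, required: str) -> bool:
--     # Canonicalize by STRIPPING trailing zeros (instead of A's zero-padding),
--     # then evaluate lexicographic >= by a right-to-left accumulator fold
--     # seeded with the length comparison (no padding, no builtin list compare).
--     if installed == 'unknown':
--         return True
--     inst = [int(x) for x in installed.split('.') if x.isdigit()]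
--     req = [int(x) for x in required.split('.') if x.isdigit()]
--     while inst and inst[-1] == 0:
--         inst.pop()
--     while req and req[-1] == 0:
--         req.pop()
--     res = len(inst) >= len(req)
--     for i in range(min(len(inst), len(req)) - 1, -1, -1):
--         a, b = inst[i], req[i]
--         res = a > b or (a == b and res)
--     return res
-- ===== Notes on version B (the rewrite author's own statement) =====
-- stated objective: alternative
-- what changed: Instead of A's zero-padding both parsed lists to equal length and applying Python's builtin list >=, B canonicalizes both lists by stripping trailing zeros and then evaluates lexicographic >= itself with a right-to-left accumulator fold seeded by the length comparison.
import Mathlib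
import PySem

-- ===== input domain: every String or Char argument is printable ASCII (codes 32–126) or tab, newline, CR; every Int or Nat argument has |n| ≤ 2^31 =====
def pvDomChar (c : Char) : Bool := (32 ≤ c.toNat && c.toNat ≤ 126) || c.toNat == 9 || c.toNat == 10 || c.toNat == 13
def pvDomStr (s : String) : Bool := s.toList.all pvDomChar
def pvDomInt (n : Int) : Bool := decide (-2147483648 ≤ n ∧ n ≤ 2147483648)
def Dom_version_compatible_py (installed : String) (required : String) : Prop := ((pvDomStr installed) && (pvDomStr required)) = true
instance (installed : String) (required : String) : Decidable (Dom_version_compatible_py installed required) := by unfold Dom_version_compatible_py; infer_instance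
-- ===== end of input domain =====

-- B canonicalizes the parsed version lists by stripping trailing zeros and then
-- evaluates lexicographic >= by a right-to-left accumulator fold seeded with the
-- length comparison, instead of A's pad-with-zeros-then-builtin-list->=; alternative decomposition, same cost.

-- ===== PORT A =====
-- "[int(x) for x in s.split('.') if x.isdigit()]"; none = the int() call raised
def pvParse (s : String) : Option (List Int) :=
  (((PySem.Str.split? s ".").getD []).filter (fun x => PySem.Str.strIsdigit x)).mapM
    PySem.Int.ofStr?

-- Python's `>=` on two int lists (lexicographic)
def pyListGe : List Int → List Int → Bool
  | _, [] => true
  | [], _ :: _ => false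
  | a :: as, b :: bs => if b < a then true else if a < b then false else pyListGe as bs

def version_compatible_py (installed : String) (required : String) : Bool :=
  if installed == "unknown" then true
  else
    match pvParse installed, pvParse required with
    | some ip, some rp =>
      let maxLen := Nat.max ip.length rp.length
      let ip' := ip ++ List.replicate (maxLen - ip.length) (0 : Int)
      let rp' := rp ++ List.replicate (maxLen - rp.length) (0 : Int)
      pyListGe ip' rp'
    | _, _ => true   -- the `except Exception: return True` branch (unreachable on Dom)

-- ===== PORT B =====
-- Source B's own copy of the identical parsing comprehension
def pvParseB (s : String) : Option (List Int) :=
  (((PySem.Str.split? s ".").getD []).filter (fun x => PySem.Str.strIsdigit x)).mapM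
    PySem.Int.ofStr?

-- Source B's "while l and l[-1] == 0: l.pop()" (remove the maximal all-zero suffix),
-- as structural recursion from the front
def stripTrail : List Int → List Int
  | [] => []
  | a :: as =>
    match stripTrail as with
    | [] => if a == 0 then [] else [a]
    | bs => a :: bs

-- Source B's downward index loop "for i in range(min-1,-1,-1): res = a>b or (a==b and res)"
-- = a right fold over the zipped common part, seeded with len(inst) >= len(req)
def bCmp (inst req : List Int) : Bool :=
  (inst.zip req).foldr (fun ab res => decide (ab.2 < ab.1) || (ab.1 == ab.2 && res))
    (decide (req.length ≤ inst.length))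

def version_compatible_py_alt (installed : String) (required : String) : Bool :=
  if installed == "unknown" then true
  else
    match pvParseB installed with
    | none => true   -- Source B would raise here; unreachable on Dom (ASCII digits always parse)
    | some ip =>
      match pvParseB required with
      | none => true
      | some rp => bCmp (stripTrail ip) (stripTrail rp)

-- ===== PRECONDITION & SPEC =====
def Spec_version_compatible_py (installed : String) (required : String) (out : Bool) : Prop := out = version_compatible_py_alt installed required
instance (installed : String) (required : String) (out : Bool) : Decidable (Spec_version_compatible_py installed required out) := by unfold Spec_version_compatible_py; infer_instance

-- ===== CLAIM (what is proved, stated in full; the proofs are below) =====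
def Claim_equal_version_compatible_py : Prop := ∀ (installed : String) (required : String), Dom_version_compatible_py installed required → Spec_version_compatible_py installed required (version_compatible_py installed required)

-- ===== LEMMAS AND PROOFS =====

-- zero-extended element-wise lexicographic ≥ (proof device linking the two strategies)
def zG : List Int → List Int → Bool
  | [], [] => true
  | a :: as, [] => if a != 0 then decide (a > 0) else zG as []
  | [], b :: bs => if (0 : Int) != b then decide ((0 : Int) > b) else zG ([] : List Int) bs
  | a :: as, b :: bs => if a != b then decide (a > b) else zG as bs

-- A's padding + list-≥ equals the zero-extended comparison
theorem pyListGe_pad_eq_zG : ∀ (as bs : List Int),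
    pyListGe (as ++ List.replicate (Nat.max as.length bs.length - as.length) (0 : Int))
             (bs ++ List.replicate (Nat.max as.length bs.length - bs.length) (0 : Int))
      = zG as bs := by
  intro as
  induction as with
  | nil =>
    intro bs
    induction bs with
    | nil => simp [pyListGe, zG]
    | cons b bs ih =>
      simp only [List.length_nil, List.length_cons, Nat.max_eq_right (Nat.zero_le _),
        Nat.sub_zero, Nat.sub_self, List.replicate_succ, List.replicate_zero,
        List.nil_append, List.append_nil, pyListGe, zG]
      simp only [List.length_nil, Nat.max_eq_right (Nat.zero_le _), Nat.sub_zero] at ih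
      by_cases hb : b = (0 : Int)
      · subst hb; simpa using ih
      · rcases lt_or_gt_of_ne hb with h | h
        · simp [h, bne_iff_ne, Ne.symm hb]
        · simp [h, not_lt.mpr (le_of_lt h), bne_iff_ne, Ne.symm hb]
  | cons a as ih =>
    intro bs
    cases bs with
    | nil =>
      have ihn := ih []
      simp only [List.length_nil, Nat.max_eq_left (Nat.zero_le _), Nat.sub_zero,
        Nat.sub_self, List.replicate_zero, List.append_nil, List.nil_append] at ihn ⊢
      simp only [List.length_cons, List.replicate_succ, pyListGe, zG]
      by_cases ha : a = (0 : Int)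
      · subst ha; simpa using ihn
      · rcases lt_or_gt_of_ne ha with h | h
        · simp [h, bne_iff_ne, ha]
        · simp [h, bne_iff_ne, ha]
    | cons b bs =>
      have ihb := ih bs
      simp only [List.length_cons, Nat.succ_max_succ, Nat.succ_sub_succ,
        List.cons_append, pyListGe, zG]
      by_cases hab : a = b
      · subst hab; simpa [bne_iff_ne] using ihb
      · rcases lt_or_gt_of_ne hab with h | h
        · simp [h, bne_iff_ne, hab]
        · simp [h, bne_iff_ne, hab]

-- appending a zero on either side does not change the zero-extended comparison
theorem zG_append_zero_left : ∀ (xs ys : List Int), zG (xs ++ [0]) ys = zG xs ys := by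
  intro xs
  induction xs with
  | nil => intro ys; cases ys <;> simp [zG]
  | cons a as ih => intro ys; cases ys <;> simp [zG, ih]

theorem zG_append_zero_right : ∀ (ys xs : List Int), zG xs (ys ++ [0]) = zG xs ys := by
  intro ys
  induction ys with
  | nil => intro xs; cases xs <;> simp [zG]
  | cons b bs ih => intro xs; cases xs <;> simp [zG, ih]

theorem zG_append_replicate_left (xs ys : List Int) (k : Nat) :
    zG (xs ++ List.replicate k 0) ys = zG xs ys := by
  induction k with
  | zero => simp
  | succ n ih =>
    have : xs ++ List.replicate (n+1) 0 = (xs ++ List.replicate n 0) ++ [0] := by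
      simp [List.replicate_succ' (n := n), List.append_assoc]
    rw [this, zG_append_zero_left, ih]

theorem zG_append_replicate_right (xs ys : List Int) (k : Nat) :
    zG xs (ys ++ List.replicate k 0) = zG xs ys := by
  induction k with
  | zero => simp
  | succ n ih =>
    have : ys ++ List.replicate (n+1) 0 = (ys ++ List.replicate n 0) ++ [0] := by
      simp [List.replicate_succ' (n := n), List.append_assoc]
    rw [this, zG_append_zero_right, ih]

theorem getLast?_cons_ne {α : Type} (a : α) (l : List α) (h : l ≠ []) :
    (a :: l).getLast? = l.getLast? := by
  cases l with
  | nil => exact absurd rfl h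
  | cons b bs => rw [List.getLast?_cons_cons]

-- stripTrail removes exactly a suffix of zeros
theorem stripTrail_spec : ∀ (l : List Int), ∃ k, l = stripTrail l ++ List.replicate k 0 := by
  intro l
  induction l with
  | nil => exact ⟨0, rfl⟩
  | cons a as ih =>
    obtain ⟨k, hk⟩ := ih
    cases hs : stripTrail as with
    | nil =>
      rw [hs] at hk
      by_cases ha : a = (0 : Int)
      · subst ha
        refine ⟨k + 1, ?_⟩
        have h1 : stripTrail (0 :: as) = [] := by simp [stripTrail, hs]
        rw [h1, hk]; simp [List.replicate_succ]
      · refine ⟨k, ?_⟩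
        have h1 : stripTrail (a :: as) = [a] := by simp [stripTrail, hs, ha]
        rw [h1, hk]; simp
    | cons c cs =>
      refine ⟨k, ?_⟩
      simp only [stripTrail, hs]
      rw [hk, hs]
      simp

theorem stripTrail_last_ne_zero : ∀ (l : List Int) (z : Int),
    (stripTrail l).getLast? = some z → z ≠ 0 := by
  intro l
  induction l with
  | nil => intro z h; simp [stripTrail] at h
  | cons a as ih =>
    intro z h
    cases hs : stripTrail as with
    | nil =>
      simp only [stripTrail, hs] at h
      by_cases ha : a = (0 : Int)
      · simp [ha] at h
      · simp [ha] at h; omega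
    | cons c cs =>
      simp only [stripTrail, hs] at h
      rw [List.getLast?_cons_cons] at h
      exact ih z (by rw [hs]; exact h)

theorem stripTrail_subset : ∀ (l : List Int), ∀ x ∈ stripTrail l, x ∈ l := by
  intro l x hx
  obtain ⟨k, hk⟩ := stripTrail_spec l
  rw [hk]; exact List.mem_append_left _ hx

-- zG against [] on a nonneg list is true
theorem zG_nil_right (xs : List Int) (h : ∀ x ∈ xs, 0 ≤ x) : zG xs [] = true := by
  induction xs with
  | nil => simp [zG]
  | cons a as ih =>
    have ha := h a (List.mem_cons_self ..)
    by_cases h0 : a = (0 : Int)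
    · simp [zG, h0]; exact ih (fun x hx => h x (List.mem_cons_of_mem _ hx))
    · simp [zG, bne_iff_ne, h0]; omega

-- zG of [] against a nonneg list ending in a nonzero is false
theorem zG_nil_left (ys : List Int) (h : ∀ y ∈ ys, 0 ≤ y)
    (hz : ∀ z, ys.getLast? = some z → z ≠ 0) (hne : ys ≠ []) : zG [] ys = false := by
  induction ys with
  | nil => exact absurd rfl hne
  | cons b bs ih =>
    have hb := h b (List.mem_cons_self ..)
    by_cases h0 : b = (0 : Int)
    · subst h0
      have hbs : bs ≠ [] := by
        intro hb0; subst hb0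
        exact hz 0 (by simp) rfl
      simp only [zG, bne_self_eq_false, Bool.false_eq_true, if_false]
      exact ih (fun y hy => h y (List.mem_cons_of_mem _ hy))
        (fun z hzz => hz z (by rw [getLast?_cons_ne _ _ hbs]; exact hzz)) hbs
    · have : (0:Int) < b := lt_of_le_of_ne hb (Ne.symm h0)
      simp [zG, bne_iff_ne, Ne.symm h0]; omega

-- on nonneg lists with no trailing zero, the zero-extended comparison is B's fold
theorem zG_eq_bCmp : ∀ (xs ys : List Int),
    (∀ x ∈ xs, 0 ≤ x) → (∀ y ∈ ys, 0 ≤ y) →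
    (∀ z, xs.getLast? = some z → z ≠ 0) → (∀ z, ys.getLast? = some z → z ≠ 0) →
    zG xs ys = bCmp xs ys := by
  intro xs
  induction xs with
  | nil =>
    intro ys hx hy hxz hyz
    cases ys with
    | nil => simp [zG, bCmp]
    | cons b bs =>
      rw [zG_nil_left (b :: bs) hy hyz (by simp)]
      simp [bCmp]
  | cons a as ih =>
    intro ys hx hy hxz hyz
    cases ys with
    | nil =>
      rw [zG_nil_right (a :: as) hx]
      simp [bCmp]
    | cons b bs =>
      have hx' : ∀ x ∈ as, 0 ≤ x := fun x hxm => hx x (List.mem_cons_of_mem _ hxm)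
      have hy' : ∀ y ∈ bs, 0 ≤ y := fun y hym => hy y (List.mem_cons_of_mem _ hym)
      have hxz' : ∀ z, as.getLast? = some z → z ≠ 0 := by
        intro z hzz
        have : as ≠ [] := by intro h0; subst h0; simp at hzz
        exact hxz z (by rw [getLast?_cons_ne _ _ this]; exact hzz)
      have hyz' : ∀ z, bs.getLast? = some z → z ≠ 0 := by
        intro z hzz
        have : bs ≠ [] := by intro h0; subst h0; simp at hzz
        exact hyz z (by rw [getLast?_cons_ne _ _ this]; exact hzz)
      have ihb := ih bs hx' hy' hxz' hyz'
      simp only [zG, bCmp, List.zip_cons_cons, List.foldr_cons]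
      by_cases hab : a = b
      · subst hab
        simp only [bne_self_eq_false, Bool.false_eq_true, if_false, beq_self_eq_true,
          Bool.true_and, lt_self_iff_false, decide_false, Bool.false_or]
        simpa [bCmp] using ihb
      · rcases lt_or_gt_of_ne hab with h | h
        · simp [bne_iff_ne, hab, not_lt.mpr (le_of_lt h), beq_iff_eq]
        · simp [bne_iff_ne, hab, h]

-- a digit char is not an int-space and not a sign
theorem dropWhile_intSpace_digits (l : List Char) (h : ∀ c ∈ l, PySem.Chars.isdigit c = true) :
    l.dropWhile PySem.Int.isIntSpace = l := by
  cases l with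
  | nil => rfl
  | cons c cs =>
    have hc := h c (List.mem_cons_self ..)
    have : PySem.Int.isIntSpace c = false := by
      simp only [PySem.Chars.isdigit, Bool.and_eq_true, decide_eq_true_eq] at hc
      simp only [PySem.Int.isIntSpace]
      have h0 : ('0' : Char) ≤ c := hc.1
      simp only [Bool.or_eq_false_iff, decide_eq_false_iff_not]
      refine ⟨⟨⟨⟨⟨?_, ?_⟩, ?_⟩, ?_⟩, ?_⟩, ?_⟩ <;>
        (intro hcc; subst hcc; revert h0; decide)
    simp [this]

-- int(x) of an isdigit string (when it returns) is nonnegative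
theorem parse_str_nonneg (x : String) (hd : PySem.Str.strIsdigit x = true)
    (n : Int) (h : PySem.Int.ofStr? x = some n) : 0 ≤ n := by
  have hd' : PySem.Chars.strIsdigit x.toList = true := hd
  simp only [PySem.Chars.strIsdigit, Bool.and_eq_true, List.all_eq_true] at hd'
  obtain ⟨hne, hall⟩ := hd'
  have hall' : ∀ c ∈ x.toList, PySem.Chars.isdigit c = true := hall
  have hrev : ∀ c ∈ x.toList.reverse, PySem.Chars.isdigit c = true := by
    intro c hc; exact hall' c (List.mem_reverse.mp hc)
  simp only [PySem.Int.ofStr?, PySem.Int.ofChars?] at h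
  rw [dropWhile_intSpace_digits _ hall', dropWhile_intSpace_digits _ hrev,
    List.reverse_reverse] at h
  split at h
  · -- x.toList = '-' :: ds, impossible: '-' is not a digit
    rename_i ds heq
    have : PySem.Chars.isdigit '-' = true := hall' '-' (by rw [heq]; exact List.mem_cons_self ..)
    simp [PySem.Chars.isdigit] at this
  · -- x.toList = '+' :: ds, impossible: '+' is not a digit
    rename_i ds heq
    have : PySem.Chars.isdigit '+' = true := hall' '+' (by rw [heq]; exact List.mem_cons_self ..)
    simp [PySem.Chars.isdigit] at this
  · -- plain digits: the value is a Nat cast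
    simp only [Option.map_eq_some_iff] at h
    obtain ⟨m, hm, hn⟩ := h
    subst hn
    rw [show (∀ {α β : Type} (o : Option α) (f : α → Option β), o >>= f = o.bind f) from fun o f => rfl] at hm
    rw [Option.bind_eq_some_iff] at hm
    obtain ⟨a, ha, hm⟩ := hm
    have : (↑a : Int) = m := by simpa using hm
    rw [← this]; exact Int.natCast_nonneg a

-- every element produced by the parse is nonnegative
theorem mapM_filter_nonneg : ∀ (xs : List String) (l : List Int),
    (xs.filter (fun x => PySem.Str.strIsdigit x)).mapM PySem.Int.ofStr? = some l →
    ∀ v ∈ l, 0 ≤ v := by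
  intro xs
  induction xs with
  | nil => intro l h v hv; simp at h; subst h; simp at hv
  | cons x xs ih =>
    intro l h v hv
    by_cases hdx : PySem.Str.strIsdigit x = true
    · rw [List.filter_cons_of_pos (by simpa using hdx)] at h
      rw [List.mapM_cons] at h
      rw [show (∀ {α β : Type} (o : Option α) (f : α → Option β), o >>= f = o.bind f) from fun o f => rfl,
          Option.bind_eq_some_iff] at h
      obtain ⟨n, hn, h⟩ := h
      rw [show (∀ {α β : Type} (o : Option α) (f : α → Option β), o >>= f = o.bind f) from fun o f => rfl,
          Option.bind_eq_some_iff] at h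
      obtain ⟨rest, hrest, h⟩ := h
      have hl : l = n :: rest := by simpa using h.symm
      subst hl
      rcases List.mem_cons.mp hv with hv1 | hv2
      · subst hv1; exact parse_str_nonneg x hdx v hn
      · exact ih rest hrest v hv2
    · rw [List.filter_cons_of_neg (by simpa using hdx)] at h
      exact ih l h v hv

theorem parse_list_nonneg (s : String) (l : List Int) (h : pvParse s = some l) :
    ∀ x ∈ l, 0 ≤ x := by
  unfold pvParse at h
  exact mapM_filter_nonneg _ l h

-- ===== VERDICT (by name: the statement is the Claim_ definition above) =====
theorem version_compatible_py_spec : Claim_equal_version_compatible_py := by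
  intro installed required _
  unfold Spec_version_compatible_py version_compatible_py version_compatible_py_alt
  by_cases h : installed == "unknown"
  · simp [h]
  · simp only [h, Bool.false_eq_true, if_false]
    rw [show pvParseB installed = pvParse installed from rfl,
        show pvParseB required = pvParse required from rfl]
    cases hip : pvParse installed with
    | none => rfl
    | some ip =>
      cases hrp : pvParse required with
      | none => rfl
      | some rp =>
        simp only
        rw [pyListGe_pad_eq_zG ip rp]
        obtain ⟨ki, hki⟩ := stripTrail_spec ip
        obtain ⟨kr, hkr⟩ := stripTrail_spec rp
        have hnn_i := parse_list_nonneg installed ip hip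
        have hnn_r := parse_list_nonneg required rp hrp
        calc zG ip rp
            = zG (stripTrail ip ++ List.replicate ki 0) (stripTrail rp ++ List.replicate kr 0) := by
              rw [← hki, ← hkr]
          _ = zG (stripTrail ip) (stripTrail rp) := by
              rw [zG_append_replicate_left, zG_append_replicate_right]
          _ = bCmp (stripTrail ip) (stripTrail rp) :=
              zG_eq_bCmp _ _
                (fun x hx => hnn_i x (stripTrail_subset ip x hx))
                (fun y hy => hnn_r y (stripTrail_subset rp y hy))
                (stripTrail_last_ne_zero ip) (stripTrail_last_ne_zero rp)
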